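-- pv_equiv track=rewrite | github.com/Doomsy1/ArcadeFSE | src/chess/board.py | is_pawn_check
-- ===== SOURCE A (Python) =====
-- class Piece:
--     # last 3 bits are type
--     pawn = 1
--     knight = 2
--     bishop = 3
--     rook = 4
--     queen = 5
--     king = 6
--
--     # first 2 bits are color
--     white = 8
--     black = 16
--
--     @staticmethod
--     def is_color(piece, color):
--         return piece & color
--
--     @staticmethod
--     def is_type(piece, type):
--         return piece & type
--
--     @staticmethod
--     def get_color(piece):
--         return piece & 24 # 24 is 11000 in binary
--
--     @staticmethod
--     def get_type(piece):
--         return piece & 7 # 7 is 111 in binary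
--
--     @staticmethod
--     def make_piece(color, type):
--         return color | type
--
--     @staticmethod
--     def get_piece(color, type):
--         return color | type
--
--     @staticmethod
--     def get_piece_from_char(char):
--         return piece_to_char_map[char]
--
--     @staticmethod
--     def get_char_from_piece(piece):
--         return char_to_piece_map[piece]
--
--     @staticmethod
--     def get_value(piece):
--         return piece_values[piece]
--
-- def is_pawn_check(square, enemy_king_square, piece):
--     move_direction = 1 if Piece.get_color(piece) == Piece.white else -1
--
--     for offset in [-1, 1]:
--         attack_rank = square // 8 + move_direction
--         attack_file = square % 8 + offset
--         if 0 <= attack_rank < 8 and 0 <= attack_file < 8: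
--             attack_square = attack_rank * 8 + attack_file
--             if attack_square == enemy_king_square:
--                 return True
--
--     return False
-- ===== SOURCE B (Python) =====
-- def is_pawn_check(square, enemy_king_square, piece):
--     move_direction = 1 if (piece & 24) == 8 else -1
--     target_rank = square // 8 + move_direction
--     if not (0 <= target_rank < 8):
--         return False
--     king_rank, king_file = divmod(enemy_king_square, 8)
--     return king_rank == target_rank and abs(king_file - square % 8) == 1
-- ===== Notes on version B (the rewrite author's own statement) =====
-- stated objective: simpler
-- what changed: Replaces the enumeration of both pawn attack squares (loop over offsets -1/+1 with bounds checks) by a closed-form offset test: compare the king's divmod rank/file against the pawn's target rank and require a file distance of exactly 1.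
import Mathlib
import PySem

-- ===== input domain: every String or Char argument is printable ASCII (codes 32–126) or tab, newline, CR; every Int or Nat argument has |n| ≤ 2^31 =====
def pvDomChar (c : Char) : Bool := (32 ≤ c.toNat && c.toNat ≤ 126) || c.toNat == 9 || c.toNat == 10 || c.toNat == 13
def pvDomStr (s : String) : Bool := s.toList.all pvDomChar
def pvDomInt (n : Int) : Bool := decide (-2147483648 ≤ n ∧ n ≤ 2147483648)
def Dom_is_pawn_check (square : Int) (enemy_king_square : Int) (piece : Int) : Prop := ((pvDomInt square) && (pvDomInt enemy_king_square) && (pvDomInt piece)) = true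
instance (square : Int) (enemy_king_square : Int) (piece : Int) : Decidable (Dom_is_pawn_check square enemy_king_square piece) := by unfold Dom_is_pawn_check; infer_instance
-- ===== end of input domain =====

-- B replaces the two-offset attack-square enumeration with a closed-form divmod offset test (simpler).


-- ===== PORT A =====
-- literal port: loop over offsets [-1, 1], early-return True via the Bool accumulator
def is_pawn_check (square : Int) (enemy_king_square : Int) (piece : Int) : Bool :=
  let move_direction : Int := if PySem.Int.band piece 24 == 8 then 1 else -1
  ([-1, 1] : List Int).foldl (fun found offset =>
    if found then found
    else
      let attack_rank := PySem.Int.floordiv square 8 + move_direction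
      let attack_file := PySem.Int.mod square 8 + offset
      if 0 ≤ attack_rank ∧ attack_rank < 8 ∧ 0 ≤ attack_file ∧ attack_file < 8 then
        if attack_rank * 8 + attack_file == enemy_king_square then true else found
      else found) false

-- ===== PORT B =====
-- literal port of Source B: target rank guard, then divmod of the king square and a file-distance test
def is_pawn_check_alt (square : Int) (enemy_king_square : Int) (piece : Int) : Bool :=
  let move_direction : Int := if PySem.Int.band piece 24 == 8 then 1 else -1
  let target_rank := PySem.Int.floordiv square 8 + move_direction
  if ¬ (0 ≤ target_rank ∧ target_rank < 8) then false
  else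
    let king_rank := PySem.Int.floordiv enemy_king_square 8
    let king_file := PySem.Int.mod enemy_king_square 8
    (king_rank == target_rank) && ((king_file - PySem.Int.mod square 8).natAbs == 1)

-- ===== PRECONDITION & SPEC =====
def Spec_is_pawn_check (square : Int) (enemy_king_square : Int) (piece : Int) (out : Bool) : Prop := out = is_pawn_check_alt square enemy_king_square piece
instance (square : Int) (enemy_king_square : Int) (piece : Int) (out : Bool) : Decidable (Spec_is_pawn_check square enemy_king_square piece out) := by unfold Spec_is_pawn_check; infer_instance

-- ===== CLAIM (what is proved, stated in full; the proofs are below) =====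
def Claim_equal_is_pawn_check : Prop := ∀ (square : Int) (enemy_king_square : Int) (piece : Int), Dom_is_pawn_check square enemy_king_square piece → Spec_is_pawn_check square enemy_king_square piece (is_pawn_check square enemy_king_square piece)

-- ===== LEMMAS AND PROOFS =====
theorem is_pawn_check_eq (square enemy_king_square piece : Int) :
    is_pawn_check square enemy_king_square piece = is_pawn_check_alt square enemy_king_square piece := by
  unfold is_pawn_check is_pawn_check_alt
  have hq : PySem.Int.floordiv square 8 = square / 8 :=
    PySem.Int.floordiv_eq_ediv_of_pos (by norm_num)
  have hr : PySem.Int.mod square 8 = square % 8 :=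
    PySem.Int.mod_eq_emod_of_pos (by norm_num)
  have hkq : PySem.Int.floordiv enemy_king_square 8 = enemy_king_square / 8 :=
    PySem.Int.floordiv_eq_ediv_of_pos (by norm_num)
  have hkr : PySem.Int.mod enemy_king_square 8 = enemy_king_square % 8 :=
    PySem.Int.mod_eq_emod_of_pos (by norm_num)
  rw [hq, hr, hkq, hkr]
  -- the move direction is the same expression on both sides; the equivalence holds for any value of it
  generalize (if (PySem.Int.band piece 24 == 8) then (1 : Int) else -1) = md
  simp only [List.foldl, Bool.false_eq_true, if_false, beq_iff_eq]
  split_ifs <;> simp_all <;> omega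

-- ===== VERDICT (by name: the statement is the Claim_ definition above) =====
theorem is_pawn_check_spec : Claim_equal_is_pawn_check := by
  intro square enemy_king_square piece _
  exact (is_pawn_check_eq square enemy_king_square piece)
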